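-- pv_equiv track=rewrite | github.com/briandelmsft/STAT-Function | shared/data.py | return_highest_value
-- ===== SOURCE A (Python) =====
-- def return_highest_value(input_list:list, key:str, order:list=['High','Medium','Low','Informational','None','Unknown']):
--     """Find the highest value in a list of dictionaries.
--
--     Searches through a list of dictionaries to find the highest value
--     for a specific key, based on a predefined priority order.
--
--     Args:
--         input_list (list): List of dictionaries to search.
--         key (str): Key name to check in each dictionary.
--         order (list, optional): Priority order from highest to lowest.
--             Defaults to ['High','Medium','Low','Informational','None','Unknown'].
--
--     Returns:
--         str: The highest priority value found, or 'Unknown' if none match.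
--     """
--
--     unsorted_list = []
--     for item in input_list:
--         unsorted_list.append(item[key].lower())
--
--     for item in order:
--         if item.lower() in unsorted_list:
--             return item
--
--     return 'Unknown'
-- ===== SOURCE B (Python) =====
-- def return_highest_value(input_list:list, key:str, order:list=['High','Medium','Low','Informational','None','Unknown']):
--     rank = {}
--     for i, item in enumerate(order):
--         rank.setdefault(item.lower(), i)
--     best = None
--     for item in input_list:
--         r = rank.get(item[key].lower())
--         if r is not None and (best is None or r < best):
--             best = r
--     return order[best] if best is not None else 'Unknown'
-- ===== Notes on version B (the rewrite author's own statement) =====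
-- stated objective: faster
-- what changed: Instead of materialising a lowercased copy of all values and then scanning that list once per order element (a nested membership scan), B builds a rank dict from the order once and makes a single pass over the input tracking the minimal rank.
import Mathlib
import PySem

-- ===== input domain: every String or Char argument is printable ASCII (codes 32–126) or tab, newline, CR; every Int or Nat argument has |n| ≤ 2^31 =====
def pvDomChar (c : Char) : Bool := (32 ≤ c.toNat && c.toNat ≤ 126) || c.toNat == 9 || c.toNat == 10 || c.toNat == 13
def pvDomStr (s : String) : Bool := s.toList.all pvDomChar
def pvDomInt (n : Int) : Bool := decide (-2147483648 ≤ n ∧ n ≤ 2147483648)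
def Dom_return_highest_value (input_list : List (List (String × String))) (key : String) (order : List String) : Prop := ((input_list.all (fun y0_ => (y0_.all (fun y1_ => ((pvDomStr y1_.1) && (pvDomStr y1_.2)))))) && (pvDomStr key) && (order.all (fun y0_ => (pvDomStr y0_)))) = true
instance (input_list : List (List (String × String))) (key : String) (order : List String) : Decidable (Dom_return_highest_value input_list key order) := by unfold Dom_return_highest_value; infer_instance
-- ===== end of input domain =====

-- B replaces A's "lowercase every value into a list, then scan that list once per order element"
-- with a rank dict built once from the order and a single min-tracking pass over the input (objective: faster).

-- ===== PORT A =====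
-- A-side helper: A's second loop — the first order element whose lowercase occurs in unsorted_list
def pvScanOrder (unsorted : List String) : List String → String
  | [] => "Unknown"
  | o :: rest => if unsorted.contains (PySem.Str.lower o) then o else pvScanOrder unsorted rest

def return_highest_value (input_list : List (List (String × String))) (key : String) (order : List String) : String :=
  -- first loop: unsorted_list.append(item[key].lower()); item[key] raises KeyError when absent (excluded by Pre_)
  let unsorted_list : List String :=
    input_list.foldl (fun acc item => acc ++ [PySem.Str.lower (((PySem.Dict.mk item).get? key).getD "")]) []
  pvScanOrder unsorted_list order

-- ===== PORT B =====
def return_highest_value_alt (input_list : List (List (String × String))) (key : String) (order : List String) : String :=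
  -- rank = {}; for i, item in enumerate(order): rank.setdefault(item.lower(), i)
  let rank : PySem.Dict String Int :=
    (PySem.List.enumerate order).foldl (fun d p => d.setdefault (PySem.Str.lower p.2) p.1) PySem.Dict.empty
  -- best = None; for item in input_list: r = rank.get(item[key].lower()); keep the smaller rank
  let best : Option Int := input_list.foldl (fun b item =>
      match rank.get? (PySem.Str.lower (((PySem.Dict.mk item).get? key).getD "")) with
      | none => b
      | some r => match b with
        | none => some r
        | some bb => if r < bb then some r else b) none
  -- return order[best] if best is not None else 'Unknown'
  match best with
  | none => "Unknown"
  | some b => (PySem.List.pyGet? order b).getD ""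

-- ===== PRECONDITION & SPEC =====
-- Pre_ excludes exactly the inputs where Python A raises KeyError: an item without the key.
def Pre_return_highest_value (input_list : List (List (String × String))) (key : String) (order : List String) : Prop :=
  ∀ item ∈ input_list, ((PySem.Dict.mk item).get? key).isSome = true
instance (input_list : List (List (String × String))) (key : String) (order : List String) : Decidable (Pre_return_highest_value input_list key order) := by unfold Pre_return_highest_value; infer_instance

def pvWitness_return_highest_value : (List (List (String × String))) × String × List String :=
  ([[("severity", "LOW")], [("severity", "High"), ("x", "y")]], "severity",
   ["High", "Medium", "Low", "Informational", "None", "Unknown"])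

def Spec_return_highest_value (input_list : List (List (String × String))) (key : String) (order : List String) (out : String) : Prop := out = return_highest_value_alt input_list key order
instance (input_list : List (List (String × String))) (key : String) (order : List String) (out : String) : Decidable (Spec_return_highest_value input_list key order out) := by unfold Spec_return_highest_value; infer_instance

-- ===== CLAIM (what is proved, stated in full; the proofs are below) =====
def Claim_equal_return_highest_value : Prop := ∀ (input_list : List (List (String × String))) (key : String) (order : List String), Dom_return_highest_value input_list key order → Pre_return_highest_value input_list key order → Spec_return_highest_value input_list key order (return_highest_value input_list key order)

-- ===== LEMMAS AND PROOFS =====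

-- A's second loop returns order[first index whose lowered element is in L] (or 'Unknown')
lemma pv_scan_eq (L : List String) : ∀ (order : List String),
    pvScanOrder L order
      = match order.findIdx? (fun o => L.contains (PySem.Str.lower o)) with
        | none => "Unknown"
        | some i => order.getD i "" := by
  intro order
  induction order with
  | nil => simp [pvScanOrder]
  | cons o rest ih =>
    rw [pvScanOrder, List.findIdx?_cons]
    cases h : L.contains (PySem.Str.lower o) with
    | true => simp
    | false =>
      simp only [Bool.false_eq_true, if_false, ih]
      cases hf : rest.findIdx? (fun o => L.contains (PySem.Str.lower o)) <;> simp_all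

-- characterisation of B's rank dict: rank maps v to the FIRST order index whose element lowers to v
lemma pv_rank_get (v : String) : ∀ (order : List String) (s : Int) (d : PySem.Dict String Int),
    ((PySem.List.enumerate order s).foldl (fun d p => d.setdefault (PySem.Str.lower p.2) p.1) d).get? v
      = (d.get? v).or ((order.findIdx? (fun o => PySem.Str.lower o == v)).map (fun j : Nat => s + (j : Int))) := by
  intro order
  induction order with
  | nil => intro s d; simp [PySem.List.enumerate]
  | cons o rest ih =>
    intro s d
    rw [PySem.List.enumerate_cons, List.foldl_cons, ih, List.findIdx?_cons]
    cases hv : (PySem.Str.lower o == v) with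
    | true =>
      have he : v = PySem.Str.lower o := (eq_of_beq hv).symm
      subst he
      rw [PySem.Dict.get?_setdefault_self]
      cases hd : d.get? (PySem.Str.lower o) <;> simp
    | false =>
      have hne : v ≠ PySem.Str.lower o := fun h => by subst h; simp at hv
      rw [PySem.Dict.get?_setdefault_of_ne _ _ hne]
      cases hr : rest.findIdx? (fun o => PySem.Str.lower o == v) <;>
        cases hd : d.get? v <;> simp [Option.or] <;> omega

-- B's min-tracking pass computes the minimum of the defined ranks (accumulator as a prefix)
lemma pv_best_eq (rank : PySem.Dict String Int) (key : String) :
    ∀ (il : List (List (String × String))) (b : Option Int),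
    il.foldl (fun b item =>
        match rank.get? (PySem.Str.lower (((PySem.Dict.mk item).get? key).getD "")) with
        | none => b
        | some r => match b with
          | none => some r
          | some bb => if r < bb then some r else b) b
      = (b.toList ++ (il.map (fun item => PySem.Str.lower (((PySem.Dict.mk item).get? key).getD ""))).filterMap
          (fun v => rank.get? v)).min? := by
  intro il
  induction il with
  | nil => intro b; cases b <;> simp
  | cons x rest ih =>
    intro b
    rw [List.foldl_cons, ih]
    cases hx : rank.get? (PySem.Str.lower (((PySem.Dict.mk x).get? key).getD "")) with
    | none => simp [hx]
    | some r =>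
      cases b with
      | none => simp [hx]
      | some bb =>
        simp only [List.map_cons, List.filterMap_cons, hx]
        show (((if r < bb then some r else some bb) : Option Int).toList
              ++ (rest.map (fun item => PySem.Str.lower (((PySem.Dict.mk item).get? key).getD ""))).filterMap (fun v => rank.get? v)).min?
            = ([bb] ++ r :: (rest.map (fun item => PySem.Str.lower (((PySem.Dict.mk item).get? key).getD ""))).filterMap (fun v => rank.get? v)).min?
        have hmin : ((if r < bb then some r else some bb) : Option Int).toList = [min bb r] := by
          split_ifs <;> simp <;> omega
        rw [hmin, List.singleton_append, List.singleton_append, List.min?_cons, List.min?_cons, List.min?_cons]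
        cases hm : ((rest.map (fun item => PySem.Str.lower (((PySem.Dict.mk item).get? key).getD ""))).filterMap (fun v => rank.get? v)).min? with
        | none => simp only [Option.elim]
        | some m =>
          simp only [Option.elim]
          congr 1
          omega

-- the crux: the minimum defined rank over L is the first order index whose lowered element is in L
lemma pv_min_eq (L order : List String) :
    (L.filterMap (fun v => (order.findIdx? (fun o => PySem.Str.lower o == v)).map (fun j : Nat => (j : Int)))).min?
      = (order.findIdx? (fun o => L.contains (PySem.Str.lower o))).map (fun i : Nat => (i : Int)) := by
  cases h : order.findIdx? (fun o => L.contains (PySem.Str.lower o)) with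
  | none =>
    rw [List.findIdx?_eq_none_iff] at h
    have hnil : L.filterMap (fun v => (order.findIdx? (fun o => PySem.Str.lower o == v)).map (fun j : Nat => (j : Int))) = [] := by
      rw [List.filterMap_eq_nil_iff]
      intro v hv
      cases hf : order.findIdx? (fun o => PySem.Str.lower o == v) with
      | none => simp
      | some j =>
        exfalso
        rw [List.findIdx?_eq_some_iff_findIdx_eq] at hf
        obtain ⟨hj, hje⟩ := hf
        have hpj := List.findIdx_getElem (p := fun o => PySem.Str.lower o == v) (xs := order) (w := by omega)
        simp only [hje] at hpj
        have hvo : PySem.Str.lower order[j] = v := eq_of_beq hpj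
        have hc := h order[j] (List.getElem_mem hj)
        rw [hvo] at hc
        have hcv := List.contains_iff_mem.mpr hv
        rw [hc] at hcv
        exact Bool.false_ne_true hcv
    rw [hnil]; simp
  | some i =>
    rw [List.findIdx?_eq_some_iff_findIdx_eq] at h
    obtain ⟨hi, hie⟩ := h
    have hPi : L.contains (PySem.Str.lower order[i]) = true := by
      have h2 := List.findIdx_getElem (p := fun o => L.contains (PySem.Str.lower o)) (xs := order) (w := by omega)
      simp only [hie] at h2
      exact h2
    have hmin : ∀ (k : ℕ) (hk : k < order.length), k < i → L.contains (PySem.Str.lower (order[k]'hk)) = false := by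
      intro k hk hki
      have h2 := List.not_of_lt_findIdx (p := fun o => L.contains (PySem.Str.lower o)) (xs := order) (i := k)
        (show k < List.findIdx (fun o => L.contains (PySem.Str.lower o)) order by omega)
      exact h2
    rw [Option.map_some, List.min?_eq_some_iff]
    constructor
    · rw [List.mem_filterMap]
      refine ⟨PySem.Str.lower order[i], List.contains_iff_mem.mp hPi, ?_⟩
      have hex : order.findIdx? (fun o => PySem.Str.lower o == PySem.Str.lower order[i])
          = some (List.findIdx (fun o => PySem.Str.lower o == PySem.Str.lower order[i]) order) :=
        List.findIdx?_eq_some_of_exists ⟨order[i], List.getElem_mem hi, by simp⟩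
      have hj : List.findIdx (fun o => PySem.Str.lower o == PySem.Str.lower order[i]) order < order.length := by
        rw [List.findIdx?_eq_some_iff_findIdx_eq] at hex; exact hex.1
      have hje := List.findIdx_getElem (p := fun o => PySem.Str.lower o == PySem.Str.lower order[i]) (xs := order) (w := hj)
      have hjeq : PySem.Str.lower (order[List.findIdx (fun o => PySem.Str.lower o == PySem.Str.lower order[i]) order]'hj) = PySem.Str.lower order[i] := eq_of_beq hje
      have hji : List.findIdx (fun o => PySem.Str.lower o == PySem.Str.lower order[i]) order = i := by
        rcases lt_trichotomy (List.findIdx (fun o => PySem.Str.lower o == PySem.Str.lower order[i]) order) i with hlt | he | hgt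
        · exfalso
          have hc := hmin _ hj hlt
          rw [hjeq] at hc
          rw [hc] at hPi; exact absurd hPi (by simp)
        · exact he
        · exfalso
          have h2 := List.not_of_lt_findIdx (p := fun o => PySem.Str.lower o == PySem.Str.lower order[i]) (xs := order) (i := i)
            (show i < List.findIdx (fun o => PySem.Str.lower o == PySem.Str.lower order[i]) order by omega)
          simp at h2
          exact h2 rfl
      rw [hex, hji, Option.map_some]
    · intro r hr
      rw [List.mem_filterMap] at hr
      obtain ⟨v, hvL, hfv⟩ := hr
      cases hf : order.findIdx? (fun o => PySem.Str.lower o == v) with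
      | none => rw [hf] at hfv; simp at hfv
      | some j =>
        rw [hf, Option.map_some, Option.some_inj] at hfv
        rw [List.findIdx?_eq_some_iff_findIdx_eq] at hf
        obtain ⟨hj, hje⟩ := hf
        have hpj := List.findIdx_getElem (p := fun o => PySem.Str.lower o == v) (xs := order) (w := by omega)
        simp only [hje] at hpj
        have hvo : PySem.Str.lower order[j] = v := eq_of_beq hpj
        have hcj : L.contains (PySem.Str.lower order[j]) = true := by
          rw [hvo]; exact List.contains_iff_mem.mpr hvL
        have hni : ¬ j < i := fun hlt => by rw [hmin j hj hlt] at hcj; exact absurd hcj (by simp)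
        omega

-- ===== VERDICT (by name: the statement is the Claim_ definition above) =====
theorem return_highest_value_spec : Claim_equal_return_highest_value := by
  intro il key order _ _
  simp only [Spec_return_highest_value, return_highest_value, return_highest_value_alt]
  rw [PySem.List.foldl_append_singleton_eq_map, List.nil_append, pv_scan_eq]
  rw [pv_best_eq]
  simp only [Option.toList_none, List.nil_append]
  have hfm : (List.map (fun item => PySem.Str.lower (((PySem.Dict.mk item).get? key).getD "")) il).filterMap
        (fun v => ((PySem.List.enumerate order).foldl (fun d p => d.setdefault (PySem.Str.lower p.2) p.1) PySem.Dict.empty).get? v)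
      = (List.map (fun item => PySem.Str.lower (((PySem.Dict.mk item).get? key).getD "")) il).filterMap
        (fun v => (order.findIdx? (fun o => PySem.Str.lower o == v)).map (fun j : Nat => (j : Int))) := by
    apply List.filterMap_congr
    intro v _
    rw [pv_rank_get]
    simp
  rw [hfm, pv_min_eq]
  cases hf : order.findIdx? (fun o => (List.map (fun item => PySem.Str.lower (((PySem.Dict.mk item).get? key).getD "")) il).contains (PySem.Str.lower o)) with
  | none => simp
  | some i =>
    have hi : i < order.length := by
      rw [List.findIdx?_eq_some_iff_findIdx_eq] at hf; exact hf.1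
    simp only [Option.map_some]
    rw [PySem.List.pyGet?_natCast]
    simp [List.getD_eq_getElem?_getD]
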